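-- pv_equiv track=rewrite | github.com/gordonbchen/advent | 2024/day_22/part_1.py | calc_secret
-- ===== SOURCE A (Python) =====
-- PRUNE_NUM = 16_777_216
--
-- def calc_secret(num, n_steps):
--     for i in range(n_steps):
--         num ^= num * 64
--         num %= PRUNE_NUM
--
--         num ^= num // 32
--         num %= PRUNE_NUM
--
--         num ^= num * 2048
--         num %= PRUNE_NUM
--
--     return num
-- ===== SOURCE B (Python) =====
-- PRUNE_NUM = 16_777_216
--
--
-- def _step(x):
--     x = (x ^ (x << 6)) % PRUNE_NUM
--     x = (x ^ (x >> 5)) % PRUNE_NUM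
--     x = (x ^ (x << 11)) % PRUNE_NUM
--     return x
--
--
-- def _mat_vec(cols, x):
--     acc = 0
--     for c in cols:
--         if x & 1:
--             acc ^= c
--         x >>= 1
--     return acc
--
--
-- def _mat_mul(a, b):
--     return [_mat_vec(a, c) for c in b]
--
--
-- def _mat_pow(m, n):
--     if n <= 1:
--         return m
--     half = _mat_pow(_mat_mul(m, m), n // 2)
--     return half if n % 2 == 0 else _mat_mul(m, half)
--
--
-- def calc_secret(num, n_steps):
--     if n_steps <= 0:
--         return num
--     cols = [_step(1 << i) for i in range(24)]
--     return _mat_vec(_mat_pow(cols, n_steps), num % PRUNE_NUM)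
-- ===== Notes on version B (the rewrite author's own statement) =====
-- stated objective: faster
-- what changed: The PRNG step is GF(2)-linear on 24 bits, so B builds the 24x24 bit-matrix of one step (columns as 24-bit ints), raises it to the n_steps-th power by binary exponentiation and applies it once to num mod 2^24, instead of iterating the step n_steps times.
import Mathlib
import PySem

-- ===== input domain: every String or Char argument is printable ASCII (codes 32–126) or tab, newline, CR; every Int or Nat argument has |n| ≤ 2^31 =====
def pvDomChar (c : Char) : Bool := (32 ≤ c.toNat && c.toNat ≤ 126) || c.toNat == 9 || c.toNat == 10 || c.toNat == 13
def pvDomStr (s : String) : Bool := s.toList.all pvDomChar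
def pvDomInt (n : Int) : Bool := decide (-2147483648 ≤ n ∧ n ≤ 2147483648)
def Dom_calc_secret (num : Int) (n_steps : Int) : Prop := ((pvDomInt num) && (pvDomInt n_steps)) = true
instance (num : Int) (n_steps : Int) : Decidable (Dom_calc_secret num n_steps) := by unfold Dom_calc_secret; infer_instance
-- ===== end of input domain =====

-- B replaces A's n_steps-fold iteration of the GF(2)-linear PRNG step by a 24×24 bit-matrix
-- (columns stored as 24-bit ints) raised to the n_steps-th power by binary exponentiation (objective: faster).

-- ===== PORT A =====
def calc_secret (num : Int) (n_steps : Int) : Int :=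
  (PySem.List.pyRange 0 n_steps 1).foldl (fun num _i =>
    let num := PySem.Int.bxor num (num * 64)
    let num := PySem.Int.mod num 16777216
    let num := PySem.Int.bxor num (PySem.Int.floordiv num 32)
    let num := PySem.Int.mod num 16777216
    let num := PySem.Int.bxor num (num * 2048)
    PySem.Int.mod num 16777216) num

-- ===== PORT B =====
-- helper _step of Source B
def pvStepB (x : Int) : Int :=
  let x := PySem.Int.mod (PySem.Int.bxor x (x <<< (6 : Nat))) 16777216
  let x := PySem.Int.mod (PySem.Int.bxor x (x >>> (5 : Nat))) 16777216
  PySem.Int.mod (PySem.Int.bxor x (x <<< (11 : Nat))) 16777216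

-- helper _mat_vec of Source B (fold over the columns, consuming the bits of x)
def pvMatVec (cols : List Int) (x : Int) : Int :=
  (cols.foldl (fun (p : Int × Int) c =>
      (if PySem.Int.band p.2 1 ≠ 0 then PySem.Int.bxor p.1 c else p.1, p.2 >>> (1 : Nat)))
    ((0 : Int), x)).1

-- helper _mat_mul of Source B
def pvMatMul (a b : List Int) : List Int := b.map (pvMatVec a)

-- helper _mat_pow of Source B
def pvMatPow (m : List Int) (n : Nat) : List Int :=
  if n ≤ 1 then m
  else
    let half := pvMatPow (pvMatMul m m) (n / 2)
    if n % 2 = 0 then half else pvMatMul m half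
termination_by n
decreasing_by omega

def calc_secret_alt (num : Int) (n_steps : Int) : Int :=
  if n_steps ≤ 0 then num
  else
    pvMatVec (pvMatPow ((List.range 24).map (fun (i : Nat) => pvStepB ((1 : Int) <<< i))) n_steps.toNat)
      (PySem.Int.mod num 16777216)

-- ===== PRECONDITION & SPEC =====
def Spec_calc_secret (num : Int) (n_steps : Int) (out : Int) : Prop := out = calc_secret_alt num n_steps
instance (num : Int) (n_steps : Int) (out : Int) : Decidable (Spec_calc_secret num n_steps out) := by unfold Spec_calc_secret; infer_instance

-- ===== CLAIM (what is proved, stated in full; the proofs are below) =====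
def Claim_equal_calc_secret : Prop := ∀ (num : Int) (n_steps : Int), Dom_calc_secret num n_steps → Spec_calc_secret num n_steps (calc_secret num n_steps)

-- ===== LEMMAS AND PROOFS =====

-- Nat-level model of one PRNG step, split into its three xor/shift/mod stages
def pvG1 (x : Nat) : Nat := (x ^^^ x <<< 6) % 2 ^ 24
def pvG2 (x : Nat) : Nat := (x ^^^ x >>> 5) % 2 ^ 24
def pvG3 (x : Nat) : Nat := (x ^^^ x <<< 11) % 2 ^ 24
def pvSN (x : Nat) : Nat := pvG3 (pvG2 (pvG1 x))

-- Nat-level model of B's matrix application / product / power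
def pvGo : List Nat → Nat → Nat
  | [], _ => 0
  | c :: cs, x => (if x % 2 = 1 then c else 0) ^^^ pvGo cs (x / 2)

def pvMulN (a b : List Nat) : List Nat := b.map (pvGo a)

def pvPowN (m : List Nat) (n : Nat) : List Nat :=
  if n ≤ 1 then m
  else
    let half := pvPowN (pvMulN m m) (n / 2)
    if n % 2 = 0 then half else pvMulN m half
termination_by n
decreasing_by omega

def pvCast (l : List Nat) : List Int := l.map Int.ofNat

-- the loop body of port A, named for the proofs
def pvBodyA (x : Int) : Int :=
  let n1 := PySem.Int.bxor x (x * 64)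
  let n2 := PySem.Int.mod n1 16777216
  let n3 := PySem.Int.bxor n2 (PySem.Int.floordiv n2 32)
  let n4 := PySem.Int.mod n3 16777216
  let n5 := PySem.Int.bxor n4 (n4 * 2048)
  PySem.Int.mod n5 16777216

-- ---- bit toolkit ----
lemma pv_xor_shl (a b k : Nat) : (a ^^^ b) <<< k = a <<< k ^^^ b <<< k := by
  apply Nat.eq_of_testBit_eq; intro i
  simp [Nat.testBit_shiftLeft, Nat.testBit_xor, Bool.and_xor_distrib_left]

lemma pv_xor_shr (a b k : Nat) : (a ^^^ b) >>> k = a >>> k ^^^ b >>> k := by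
  apply Nat.eq_of_testBit_eq; intro i
  simp [Nat.testBit_shiftRight, Nat.testBit_xor]

lemma pv_xor_mod (a b k : Nat) : (a ^^^ b) % 2 ^ k = a % 2 ^ k ^^^ b % 2 ^ k := by
  apply Nat.eq_of_testBit_eq; intro i
  simp only [Nat.testBit_mod_two_pow, Nat.testBit_xor, Bool.and_xor_distrib_left]

lemma pvG1_linear (a b : Nat) : pvG1 (a ^^^ b) = pvG1 a ^^^ pvG1 b := by
  unfold pvG1
  rw [pv_xor_shl, ← pv_xor_mod]
  congr 1
  simp [Nat.xor_assoc, Nat.xor_comm, Nat.xor_left_comm]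

lemma pvG2_linear (a b : Nat) : pvG2 (a ^^^ b) = pvG2 a ^^^ pvG2 b := by
  unfold pvG2
  rw [pv_xor_shr, ← pv_xor_mod]
  congr 1
  simp [Nat.xor_assoc, Nat.xor_comm, Nat.xor_left_comm]

lemma pvG3_linear (a b : Nat) : pvG3 (a ^^^ b) = pvG3 a ^^^ pvG3 b := by
  unfold pvG3
  rw [pv_xor_shl, ← pv_xor_mod]
  congr 1
  simp [Nat.xor_assoc, Nat.xor_comm, Nat.xor_left_comm]

lemma pvSN_linear (a b : Nat) : pvSN (a ^^^ b) = pvSN a ^^^ pvSN b := by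
  unfold pvSN
  rw [pvG1_linear, pvG2_linear, pvG3_linear]

lemma pvSN_zero : pvSN 0 = 0 := by decide

lemma pvSN_lt (a : Nat) : pvSN a < 2 ^ 24 := by
  unfold pvSN pvG3
  exact Nat.mod_lt _ (by norm_num)

lemma pvG1_mod (a : Nat) : pvG1 (a % 2 ^ 24) = pvG1 a := by
  unfold pvG1
  apply Nat.eq_of_testBit_eq; intro i
  simp only [Nat.testBit_mod_two_pow, Nat.testBit_xor, Nat.testBit_shiftLeft]
  by_cases hi : i < 24
  · by_cases h6 : 6 ≤ i
    · have h7 : i - 6 < 24 := by omega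
      simp [hi, h6, h7]
    · simp [hi, h6]
  · simp [hi]

-- the three stages written the way the Int ports compute them
lemma pvG1_eq (r : Nat) : (r ^^^ r * 64) % 16777216 = pvG1 r := by
  unfold pvG1; rw [Nat.shiftLeft_eq]; norm_num

lemma pvG2_eq (r : Nat) : (r ^^^ r / 32) % 16777216 = pvG2 r := by
  unfold pvG2; rw [Nat.shiftRight_eq_div_pow]; norm_num

lemma pvG3_eq (r : Nat) : (r ^^^ r * 2048) % 16777216 = pvG3 r := by
  unfold pvG3; rw [Nat.shiftLeft_eq]; norm_num

-- bits of 64*m+63 (= two's-complement low bits of (-m-1)*64)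
lemma pv_63_testBit (m i : Nat) : (64 * m + 63).testBit i = (decide (i < 6) || m.testBit (i - 6)) := by
  rcases Nat.lt_or_ge i 6 with h | h
  · have h2 : (64 * m + 63).testBit i = ((64 * m + 63) % 64).testBit i := by
      rw [show (64 : Nat) = 2 ^ 6 from rfl, Nat.testBit_mod_two_pow]
      simp [h]
    rw [h2, show (64 * m + 63) % 64 = 63 from by omega,
      show (63 : Nat) = 2 ^ 6 - 1 from rfl, Nat.testBit_two_pow_sub_one]
    simp [h]
  · have h1 : i = 6 + (i - 6) := by omega
    rw [h1, ← Nat.testBit_shiftRight,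
      show (64 * m + 63) >>> 6 = m from by rw [Nat.shiftRight_eq_div_pow]; omega]
    simp [show ¬(6 + (i - 6) < 6) from by omega]

-- bits of the 24-bit complement of m
lemma pv_compl_testBit (m i : Nat) :
    (2 ^ 24 - 1 - m % 2 ^ 24).testBit i = (decide (i < 24) && !m.testBit i) := by
  rw [show 2 ^ 24 - 1 - m % 2 ^ 24 = 2 ^ 24 - (m % 2 ^ 24 + 1) from by omega,
    Nat.testBit_two_pow_sub_succ (Nat.mod_lt _ (by norm_num)), Nat.testBit_mod_two_pow]
  by_cases hi : i < 24 <;> simp [hi]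

-- stage 1 on a negative Python int -m-1: the xor of the two's complements
lemma pv_neg1 (m : Nat) : (m ^^^ (64 * m + 63)) % 2 ^ 24 = pvG1 (2 ^ 24 - 1 - m % 2 ^ 24) := by
  unfold pvG1
  apply Nat.eq_of_testBit_eq; intro i
  simp only [Nat.testBit_mod_two_pow, Nat.testBit_xor, Nat.testBit_shiftLeft,
    pv_63_testBit, pv_compl_testBit]
  by_cases hi : i < 24
  · by_cases h6 : 6 ≤ i
    · have h7 : i - 6 < 24 := by omega
      simp only [hi, h6, h7, decide_true, show ¬ (i < 6) from by omega, decide_false,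
        Bool.true_and, Bool.false_or]
      cases m.testBit i <;> cases m.testBit (i - 6) <;> rfl
    · simp only [hi, decide_true, h6, decide_false, Bool.false_and, show i < 6 from by omega,
        Bool.true_and, Bool.true_or, Bool.xor_false]
      cases m.testBit i <;> rfl
  · simp [hi]

-- ---- A side lowered to pvSN ----
lemma pv_mod_natCast (a : Nat) : PySem.Int.mod (a : Int) 16777216 = ((a % 16777216 : Nat) : Int) := by
  exact_mod_cast PySem.Int.mod_natCast a 16777216

lemma pv_stage1 (x : Int) :
    PySem.Int.mod (PySem.Int.bxor x (x * 64)) 16777216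
      = ((pvG1 ((PySem.Int.mod x 16777216).toNat) : Nat) : Int) := by
  by_cases hx : 0 ≤ x
  · obtain ⟨a, rfl⟩ := Int.eq_ofNat_of_zero_le hx
    have h64 : ((a : Int) * 64) = ((a * 64 : Nat) : Int) := by push_cast; ring
    rw [h64, PySem.Int.bxor_natCast, pv_mod_natCast, pv_mod_natCast]
    norm_cast
    rw [pvG1_eq, show (16777216 : Nat) = 2 ^ 24 from by norm_num, pvG1_mod]
  · have hxlt : x < 0 := by omega
    set m : Nat := (-x - 1).toNat with hm
    have hxm : x = -(m : Int) - 1 := by omega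
    have hneg2 : ¬ 0 ≤ x * 64 := by nlinarith
    have h1 : PySem.Int.bxor x (x * 64) = ((m ^^^ (64 * m + 63) : Nat) : Int) := by
      unfold PySem.Int.bxor
      rw [if_neg hx, if_neg hneg2]
      congr 2
      omega
    rw [h1, pv_mod_natCast]
    have h2 : (PySem.Int.mod x 16777216).toNat = 2 ^ 24 - 1 - m % 2 ^ 24 := by
      rw [PySem.Int.mod_eq_emod_of_pos (by norm_num)]
      omega
    rw [h2]
    norm_cast
    rw [show (16777216 : Nat) = 2 ^ 24 from by norm_num]
    exact pv_neg1 m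

lemma pv_bodyA_eq (x : Int) :
    pvBodyA x = ((pvSN ((PySem.Int.mod x 16777216).toNat) : Nat) : Int) := by
  unfold pvBodyA
  simp only []
  rw [pv_stage1]
  rw [show PySem.Int.floordiv ((pvG1 (PySem.Int.mod x 16777216).toNat : Nat) : Int) 32
        = (((pvG1 ((PySem.Int.mod x 16777216).toNat)) / 32 : Nat) : Int) from by
      exact_mod_cast PySem.Int.floordiv_natCast _ 32]
  rw [PySem.Int.bxor_natCast, pv_mod_natCast, pvG2_eq]
  rw [show ((pvG2 (pvG1 ((PySem.Int.mod x 16777216)).toNat) : Nat) : Int) * 2048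
        = ((pvG2 (pvG1 ((PySem.Int.mod x 16777216)).toNat) * 2048 : Nat) : Int) from by
      push_cast; ring]
  rw [PySem.Int.bxor_natCast, pv_mod_natCast, pvG3_eq]
  rfl

lemma pv_foldA : ∀ (l : List Int) (x : Int), l ≠ [] →
    l.foldl (fun num _i => pvBodyA num) x
      = ((pvSN^[l.length] ((PySem.Int.mod x 16777216).toNat) : Nat) : Int) := by
  intro l
  induction l with
  | nil => intro x h; exact absurd rfl h
  | cons e t ih =>
    intro x _
    rw [List.foldl_cons]
    by_cases ht : t = []
    · subst ht
      simp only [List.foldl_nil, List.length_cons, List.length_nil]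
      exact pv_bodyA_eq x
    · rw [ih _ ht, pv_bodyA_eq x, pv_mod_natCast]
      rw [Int.toNat_natCast,
        Nat.mod_eq_of_lt (by
          have := pvSN_lt ((PySem.Int.mod x 16777216).toNat)
          omega)]
      rw [List.length_cons, Function.iterate_succ_apply]

-- ---- B side lowered to pvGo/pvSN ----
lemma pvCast_cons (c : Nat) (cs : List Nat) : pvCast (c :: cs) = ((c : Nat) : Int) :: pvCast cs := by
  simp [pvCast, Int.ofNat_eq_natCast]

lemma pv_shl_natCast (a i : Nat) : ((a : Int) <<< i) = ((a <<< i : Nat) : Int) := by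
  exact Int.mem_toNat?.mp rfl

lemma pv_shr_natCast (a i : Nat) : ((a : Int) >>> i) = ((a >>> i : Nat) : Int) := by
  exact Int.mem_toNat?.mp rfl

lemma pvStepB_natCast (a : Nat) : pvStepB (a : Int) = ((pvSN a : Nat) : Int) := by
  unfold pvStepB
  dsimp only
  rw [pv_shl_natCast, PySem.Int.bxor_natCast, pv_mod_natCast,
    pv_shr_natCast, PySem.Int.bxor_natCast, pv_mod_natCast,
    pv_shl_natCast, PySem.Int.bxor_natCast, pv_mod_natCast]
  norm_cast

lemma pv_matVec_aux (cs : List Nat) : ∀ (acc x : Nat),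
    ((pvCast cs).foldl (fun (p : Int × Int) c =>
        (if PySem.Int.band p.2 1 ≠ 0 then PySem.Int.bxor p.1 c else p.1, p.2 >>> (1 : Nat)))
      (((acc : Nat) : Int), ((x : Nat) : Int))).1 = ((acc ^^^ pvGo cs x : Nat) : Int) := by
  induction cs with
  | nil => intro acc x; simp [pvCast, pvGo]
  | cons c cs ih =>
    intro acc x
    rw [pvCast_cons, List.foldl_cons]
    have hband : PySem.Int.band ((x : Nat) : Int) 1 = ((x % 2 : Nat) : Int) := by
      rw [show (1 : Int) = ((1 : Nat) : Int) from rfl, PySem.Int.band_natCast,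
        Nat.and_one_is_mod]
    have hshr : ((x : Nat) : Int) >>> (1 : Nat) = (((x / 2 : Nat)) : Int) := by
      rw [pv_shr_natCast, Nat.shiftRight_one]
    by_cases hx : x % 2 = 1
    · rw [if_pos (by rw [hband]; exact_mod_cast by omega), PySem.Int.bxor_natCast, hshr, ih]
      congr 1
      simp [pvGo, hx, Nat.xor_assoc]
    · rw [if_neg (by rw [hband]; simp; omega), hshr, ih]
      congr 1
      simp [pvGo, hx]

lemma pv_matVec_natCast (cs : List Nat) (x : Nat) :
    pvMatVec (pvCast cs) (x : Int) = ((pvGo cs x : Nat) : Int) := by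
  have h := pv_matVec_aux cs 0 x
  simpa [pvMatVec] using h

lemma pv_matMul_natCast (a b : List Nat) :
    pvMatMul (pvCast a) (pvCast b) = pvCast (pvMulN a b) := by
  unfold pvMatMul pvMulN pvCast
  rw [List.map_map, List.map_map]
  apply List.map_congr_left
  intro c _
  have := pv_matVec_natCast a c
  simpa [pvCast, Int.ofNat_eq_natCast] using this

lemma pv_matPow_natCast (m : List Nat) (n : Nat) :
    pvMatPow (pvCast m) n = pvCast (pvPowN m n) := by
  induction n using Nat.strong_induction_on generalizing m with
  | _ n ih =>
    unfold pvMatPow pvPowN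
    by_cases h1 : n ≤ 1
    · simp [h1]
    · rw [if_neg h1, if_neg h1]
      have hrec := ih (n / 2) (by omega) (pvMulN m m)
      rw [← pv_matMul_natCast m m] at hrec
      by_cases h2 : n % 2 = 0
      · rw [if_pos h2, if_pos h2, hrec]
      · rw [if_neg h2, if_neg h2, hrec, pv_matMul_natCast m _]

lemma pvGo_zero (cs : List Nat) : pvGo cs 0 = 0 := by
  induction cs with
  | nil => rfl
  | cons c cs ih => simp [pvGo, ih]

lemma pvGo_linear (cs : List Nat) : ∀ (a b : Nat), pvGo cs (a ^^^ b) = pvGo cs a ^^^ pvGo cs b := by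
  induction cs with
  | nil => intro a b; simp [pvGo]
  | cons c cs ih =>
    intro a b
    have hm : (a ^^^ b) % 2 = a % 2 ^^^ b % 2 := by
      have := pv_xor_mod a b 1; simpa using this
    have hd : (a ^^^ b) / 2 = a / 2 ^^^ b / 2 := by
      have := pv_xor_shr a b 1; simpa [Nat.shiftRight_one] using this
    simp only [pvGo, hm, hd, ih]
    rcases Nat.mod_two_eq_zero_or_one a with h1 | h1 <;>
      rcases Nat.mod_two_eq_zero_or_one b with h2 | h2 <;>
        simp [h1, h2, Nat.xor_comm, Nat.xor_left_comm]

lemma pvGo_mulN (a b : List Nat) : ∀ (x : Nat), pvGo (pvMulN a b) x = pvGo a (pvGo b x) := by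
  induction b with
  | nil => intro x; simp [pvMulN, pvGo, pvGo_zero]
  | cons c cs ih =>
    intro x
    simp only [pvMulN, List.map_cons, pvGo]
    rw [show pvGo (List.map (pvGo a) cs) (x / 2) = pvGo a (pvGo cs (x / 2)) from ih (x / 2)]
    rw [pvGo_linear a]
    congr 1
    by_cases hx : x % 2 = 1 <;> simp [hx, pvGo_zero]

lemma pvGo_powN : ∀ (n : Nat), 1 ≤ n → ∀ (m : List Nat) (x : Nat),
    pvGo (pvPowN m n) x = (pvGo m)^[n] x := by
  intro n
  induction n using Nat.strong_induction_on with
  | _ n ih =>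
    intro hn m x
    unfold pvPowN
    by_cases h1 : n ≤ 1
    · have : n = 1 := by omega
      subst this
      simp
    · rw [if_neg h1]
      have hf : pvGo (pvMulN m m) = pvGo m ∘ pvGo m := funext (fun y => pvGo_mulN m m y)
      have h2 : (pvGo m ∘ pvGo m) = (pvGo m)^[2] := by
        ext y; simp [Function.iterate_succ_apply]
      by_cases hp : n % 2 = 0
      · rw [if_pos hp, ih (n / 2) (by omega) (by omega) (pvMulN m m) x, hf, h2,
          ← Function.iterate_mul]
        congr 1
        omega
      · rw [if_neg hp]
        rw [pvGo_mulN]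
        rw [ih (n / 2) (by omega) (by omega) (pvMulN m m) x, hf, h2, ← Function.iterate_mul]
        rw [show pvGo m ((pvGo m)^[2 * (n / 2)] x) = (pvGo m)^[2 * (n / 2) + 1] x from
          (Function.iterate_succ_apply' (pvGo m) _ x).symm]
        congr 1
        omega

-- applying the column list [pvSN (2^s), …, pvSN (2^(s+k-1))] to x < 2^k is pvSN (x·2^s)
lemma pv_basis (k : Nat) : ∀ (s x : Nat), x < 2 ^ k →
    pvGo ((List.range k).map (fun i => pvSN (1 <<< (s + i)))) x = pvSN (x <<< s) := by
  induction k with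
  | zero =>
    intro s x hx
    interval_cases x
    simp [pvGo, Nat.zero_shiftLeft, pvSN_zero]
  | succ k ih =>
    intro s x hx
    rw [List.range_succ_eq_map, List.map_cons, List.map_map]
    have hfun : ((fun i => pvSN (1 <<< (s + i))) ∘ Nat.succ)
        = (fun i => pvSN (1 <<< ((s + 1) + i))) := by
      funext i
      simp only [Function.comp_apply]
      congr 2
      omega
    rw [hfun]
    show (if x % 2 = 1 then pvSN (1 <<< (s + 0)) else 0) ^^^
        pvGo ((List.range k).map (fun i => pvSN (1 <<< ((s + 1) + i)))) (x / 2) = pvSN (x <<< s)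
    rw [ih (s + 1) (x / 2) (by omega)]
    rcases Nat.mod_two_eq_zero_or_one x with h | h
    · simp only [h, if_neg (by omega : ¬ (0 : Nat) = 1), Nat.zero_xor]
      congr 1
      rw [Nat.shiftLeft_eq, Nat.shiftLeft_eq, pow_succ]
      have hx2 : 2 * (x / 2) = x := by omega
      calc x / 2 * (2 ^ s * 2) = 2 * (x / 2) * 2 ^ s := by ring
        _ = x * 2 ^ s := by rw [hx2]
    · rw [if_pos h, Nat.add_zero, ← pvSN_linear]
      congr 1
      apply Nat.eq_of_testBit_eq; intro i
      simp only [Nat.testBit_xor, Nat.testBit_shiftLeft]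
      rcases Nat.lt_trichotomy i s with hi | hi | hi
      · simp [show ¬ s ≤ i from by omega, show ¬ s + 1 ≤ i from by omega]
      · subst hi
        simp only [Nat.le_refl, decide_true, Nat.sub_self, Bool.true_and,
          show ¬ i + 1 ≤ i from by omega, decide_false, Bool.false_and, Bool.xor_false]
        rw [show (1 : Nat).testBit 0 = true from rfl, Nat.testBit_zero]
        simp [h]
      · have h1 : s ≤ i := by omega
        have h2 : s + 1 ≤ i := by omega
        simp only [h1, h2, decide_true, Bool.true_and]
        rw [show (1 : Nat).testBit (i - s) = false from by
          rw [show (1 : Nat) = 2 ^ 0 from rfl, Nat.testBit_two_pow]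
          simp; omega]
        rw [Bool.false_xor]
        rw [show i - s = (i - (s + 1)) + 1 from by omega, Nat.testBit_succ]

lemma pv_iter_eq : ∀ (k r : Nat), r < 2 ^ 24 →
    (pvGo ((List.range 24).map (fun i => pvSN (1 <<< i))))^[k] r = pvSN^[k] r := by
  intro k
  induction k with
  | zero => intro r _; rfl
  | succ k ih =>
    intro r hr
    rw [Function.iterate_succ_apply, Function.iterate_succ_apply]
    rw [show pvGo ((List.range 24).map (fun i => pvSN (1 <<< i))) r = pvSN r from by
      have h := pv_basis 24 0 r hr
      simpa using h]
    exact ih (pvSN r) (pvSN_lt r)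

-- ===== VERDICT (by name: the statement is the Claim_ definition above) =====
theorem calc_secret_spec : Claim_equal_calc_secret := by
  intro num n _dom
  unfold Spec_calc_secret
  by_cases hn : n ≤ 0
  · have hr : PySem.List.pyRange 0 n 1 = [] := by
      rw [PySem.List.pyRange_one]
      rw [show (n - 0).toNat = 0 from by omega]
      rfl
    unfold calc_secret calc_secret_alt
    rw [hr, if_pos hn]
    rfl
  · have hlen : (PySem.List.pyRange 0 n 1).length = n.toNat := by
      rw [PySem.List.length_pyRange_one]; omega
    have hne : PySem.List.pyRange 0 n 1 ≠ [] := by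
      intro h
      rw [h] at hlen
      simp at hlen
      omega
    have hA : calc_secret num n
        = ((pvSN^[n.toNat] ((PySem.Int.mod num 16777216).toNat) : Nat) : Int) := by
      show (PySem.List.pyRange 0 n 1).foldl (fun num _i => pvBodyA num) num = _
      rw [pv_foldA _ num hne, hlen]
    set r0 : Nat := (PySem.Int.mod num 16777216).toNat with hr0
    have hmodcast : PySem.Int.mod num 16777216 = ((r0 : Nat) : Int) := by
      rw [hr0, Int.toNat_of_nonneg (PySem.Int.mod_nonneg num (by norm_num))]
    have hr0lt : r0 < 2 ^ 24 := by
      have h1 := PySem.Int.mod_lt num (b := 16777216) (by norm_num)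
      have h2 := PySem.Int.mod_nonneg num (b := 16777216) (by norm_num)
      rw [show (2 : Nat) ^ 24 = 16777216 from by norm_num]
      omega
    have hbase : (List.range 24).map (fun (i : Nat) => pvStepB ((1 : Int) <<< i))
        = pvCast ((List.range 24).map (fun i => pvSN (1 <<< i))) := by
      unfold pvCast
      rw [List.map_map]
      apply List.map_congr_left
      intro i _
      simp only [Function.comp_apply]
      rw [show ((1 : Int) <<< i) = (((1 <<< i : Nat)) : Int) from pv_shl_natCast 1 i,
        pvStepB_natCast]
      rfl
    have hB : calc_secret_alt num n = ((pvSN^[n.toNat] r0 : Nat) : Int) := by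
      unfold calc_secret_alt
      rw [if_neg hn, hbase, hmodcast, pv_matPow_natCast, pv_matVec_natCast,
        pvGo_powN n.toNat (by omega), pv_iter_eq n.toNat r0 hr0lt]
    rw [hA, hB]
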